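-- pv_equiv track=rewrite | github.com/rong6636/DiscordBot | tasks/apex.py | find_changed_players
-- ===== SOURCE A (Python) =====
-- def find_changed_players(a_log, b_log):
--     """
--     找出在 a_log 和 b_log 中
--     Name, Level, BR_rank發生變化的玩家
--
--     :param a_log: dict{uid:dict{}}
--     :param b_log: dict{uid:dict{}}
--     :return: dict{"Name":[], "Level":[], "BR_rank":[]}
--     """
--     changed_players = {
--         "Name":[], "Level":[], "BR_rank":[]
--     }
--
--     for uid in b_log:
--         if uid in a_log:
--             if a_log[uid]["Name"] != b_log[uid]["Name"]:
--                 changed_players["Name"].append(uid)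
--             if a_log[uid]["Level"] != b_log[uid]["Level"]:
--                 changed_players["Level"].append(uid)
--             if a_log[uid]["BR_rank"] != b_log[uid]["BR_rank"]:
--                 changed_players["BR_rank"].append(uid)
--     return changed_players
-- ===== SOURCE B (Python) =====
-- def find_changed_players(a_log, b_log):
--     """Anti-join formulation: a uid's field changed iff its (uid, value) pair
--     from b_log is absent from the set of a_log's (uid, value) pairs."""
--     shared = [uid for uid in b_log if uid in a_log]
--     changed = {}
--     for field in ("Name", "Level", "BR_rank"):
--         a_pairs = {(uid, rec.get(field)) for uid, rec in a_log.items()}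
--         changed[field] = [uid for uid in shared
--                           if (uid, b_log[uid][field]) not in a_pairs]
--     return changed
-- ===== Notes on version B (the rewrite author's own statement) =====
-- stated objective: alternative
-- what changed: Replaces A's per-player lookup-and-compare of each field with a hash anti-join: for every field B builds once the set of (uid, value) pairs taken from a_log and keeps the shared uids whose (uid, value) pair from b_log is NOT in that set, so no a_log record is ever looked up or compared per player.
import Mathlib
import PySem

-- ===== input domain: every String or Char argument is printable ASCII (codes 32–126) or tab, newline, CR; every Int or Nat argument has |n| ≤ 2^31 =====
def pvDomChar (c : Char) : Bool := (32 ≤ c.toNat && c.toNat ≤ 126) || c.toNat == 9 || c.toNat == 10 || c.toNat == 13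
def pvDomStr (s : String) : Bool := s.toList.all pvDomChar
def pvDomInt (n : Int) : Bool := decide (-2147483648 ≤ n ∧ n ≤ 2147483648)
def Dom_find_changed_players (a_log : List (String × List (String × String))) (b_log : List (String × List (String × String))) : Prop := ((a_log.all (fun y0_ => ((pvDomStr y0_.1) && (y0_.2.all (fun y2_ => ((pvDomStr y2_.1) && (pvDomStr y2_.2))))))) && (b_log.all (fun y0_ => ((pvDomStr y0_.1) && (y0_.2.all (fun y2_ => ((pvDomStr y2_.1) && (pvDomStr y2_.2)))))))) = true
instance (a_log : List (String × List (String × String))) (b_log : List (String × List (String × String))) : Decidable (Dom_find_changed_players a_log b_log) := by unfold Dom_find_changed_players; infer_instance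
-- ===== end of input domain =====

-- B recasts A's per-player field comparisons as a hash anti-join: per field, a set of a_log's (uid, value) pairs, keeping shared uids whose b-pair is absent ("alternative", same cost).


-- ===== PORT A =====
-- the mutable dict {"Name":[], "Level":[], "BR_rank":[]} is carried as a triple of lists (its keys are three fixed literals)
def fcpStepA (a_log : List (String × List (String × String)))
    (acc : List String × List String × List String)
    (p : String × List (String × String)) : List String × List String × List String :=
  match List.lookup p.1 a_log with
  | none => acc
  | some ad =>
      let acc := if List.lookup "Name" ad ≠ List.lookup "Name" p.2 then (acc.1 ++ [p.1], acc.2.1, acc.2.2) else acc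
      let acc := if List.lookup "Level" ad ≠ List.lookup "Level" p.2 then (acc.1, acc.2.1 ++ [p.1], acc.2.2) else acc
      if List.lookup "BR_rank" ad ≠ List.lookup "BR_rank" p.2 then (acc.1, acc.2.1, acc.2.2 ++ [p.1]) else acc

def find_changed_players (a_log : List (String × List (String × String))) (b_log : List (String × List (String × String))) : List (String × List String) :=
  let st := b_log.foldl (fcpStepA a_log) ([], [], [])
  [("Name", st.1), ("Level", st.2.1), ("BR_rank", st.2.2)]

-- ===== PORT B =====
-- {(uid, rec.get(field)) for uid, rec in a_log.items()} — rec.get returns None for a missing field, hence Option String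
def fcpPairs (a_log : List (String × List (String × String))) (field : String) :
    PySem.Set (String × Option String) :=
  PySem.Set.ofList (a_log.map (fun p => (p.1, List.lookup field p.2)))

def find_changed_players_alt (a_log : List (String × List (String × String))) (b_log : List (String × List (String × String))) : List (String × List String) :=
  let shared := (b_log.filter (fun p => (List.lookup p.1 a_log).isSome)).map (·.1)
  ["Name", "Level", "BR_rank"].map (fun field =>
    let aPairs := fcpPairs a_log field
    (field, shared.filter (fun uid =>
      ¬ (PySem.Set.contains aPairs (uid, (List.lookup uid b_log).bind (List.lookup field)) = true))))

-- ===== PRECONDITION & SPEC =====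
def fcpHasFields (d : List (String × String)) : Bool :=
  (List.lookup "Name" d).isSome && (List.lookup "Level" d).isSome && (List.lookup "BR_rank" d).isSome

def fcpOk (a_log : List (String × List (String × String))) (p : String × List (String × String)) : Bool :=
  match List.lookup p.1 a_log with
  | none => true
  | some ad => fcpHasFields ad && fcpHasFields p.2

-- Pre_ excludes association lists with duplicate uids (they have no Python-dict counterpart, so any behaviour
-- there is an artefact of the encoding) and inputs where a uid shared by both logs has a record missing one of
-- the three fields, on which A raises KeyError.
def Pre_find_changed_players (a_log : List (String × List (String × String))) (b_log : List (String × List (String × String))) : Prop :=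
  (a_log.map (·.1)).Nodup ∧ (b_log.map (·.1)).Nodup ∧ ∀ p ∈ b_log, fcpOk a_log p = true
instance (a_log : List (String × List (String × String))) (b_log : List (String × List (String × String))) : Decidable (Pre_find_changed_players a_log b_log) := by unfold Pre_find_changed_players; infer_instance

def pvWitness_find_changed_players : (List (String × List (String × String))) × (List (String × List (String × String))) :=
  ([("u", [("Name", "a"), ("Level", "1"), ("BR_rank", "x")])],
   [("u", [("Name", "b"), ("Level", "1"), ("BR_rank", "x")])])

def Spec_find_changed_players (a_log : List (String × List (String × String))) (b_log : List (String × List (String × String))) (out : List (String × List String)) : Prop := out = find_changed_players_alt a_log b_log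
instance (a_log : List (String × List (String × String))) (b_log : List (String × List (String × String))) (out : List (String × List String)) : Decidable (Spec_find_changed_players a_log b_log out) := by unfold Spec_find_changed_players; infer_instance

-- ===== CLAIM (what is proved, stated in full; the proofs are below) =====
def Claim_equal_find_changed_players : Prop := ∀ (a_log : List (String × List (String × String))) (b_log : List (String × List (String × String))), Dom_find_changed_players a_log b_log → Pre_find_changed_players a_log b_log → Spec_find_changed_players a_log b_log (find_changed_players a_log b_log)

-- ===== LEMMAS AND PROOFS =====
-- A's fold computes, per field, the uids of b_log whose record changed (filter form)
def fcpChanged (a_log : List (String × List (String × String))) (field : String)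
    (p : String × List (String × String)) : Bool :=
  match List.lookup p.1 a_log with
  | none => false
  | some ad => List.lookup field ad ≠ List.lookup field p.2

lemma foldl_fcpStepA (a_log : List (String × List (String × String)))
    (bl : List (String × List (String × String))) (n l r : List String) :
    bl.foldl (fcpStepA a_log) (n, l, r) =
      (n ++ (bl.filter (fcpChanged a_log "Name")).map (·.1),
       l ++ (bl.filter (fcpChanged a_log "Level")).map (·.1),
       r ++ (bl.filter (fcpChanged a_log "BR_rank")).map (·.1)) := by
  induction bl generalizing n l r with
  | nil => simp
  | cons p bl ih =>
    simp only [List.foldl_cons, List.filter_cons]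
    cases h : List.lookup p.1 a_log with
    | none =>
      simp only [fcpStepA, fcpChanged, h]
      rw [ih]
      simp
    | some ad =>
      simp only [fcpStepA, fcpChanged, h]
      by_cases h1 : List.lookup "Name" ad = List.lookup "Name" p.2 <;>
        by_cases h2 : List.lookup "Level" ad = List.lookup "Level" p.2 <;>
          by_cases h3 : List.lookup "BR_rank" ad = List.lookup "BR_rank" p.2 <;>
            simp [h1, h2, h3, ih]

-- on a nodup-keyed association list, lookup of a member's key yields its value
lemma lookup_of_mem_nodup {β : Type} (l : List (String × β)) (h : (l.map (·.1)).Nodup)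
    (p : String × β) (hp : p ∈ l) : List.lookup p.1 l = some p.2 := by
  induction l with
  | nil => cases hp
  | cons q l ih =>
    simp only [List.map_cons, List.nodup_cons] at h
    rcases List.mem_cons.mp hp with rfl | hmem
    · simp [List.lookup]
    · have hne : q.1 ≠ p.1 := by
        intro he
        exact h.1 (he ▸ List.mem_map.mpr ⟨p, hmem, rfl⟩)
      have hbf : (p.1 == q.1) = false := beq_eq_false_iff_ne.mpr (Ne.symm hne)
      simp only [List.lookup, hbf]
      exact ih h.2 hmem

lemma mem_of_lookup_eq_some {β : Type} (l : List (String × β)) (u : String) (v : β)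
    (h : List.lookup u l = some v) : (u, v) ∈ l := by
  induction l with
  | nil => simp [List.lookup] at h
  | cons q l ih =>
    obtain ⟨k, w⟩ := q
    by_cases he : k = u
    · subst he
      simp only [List.lookup, beq_self_eq_true] at h
      cases h
      exact List.mem_cons_self ..
    · have hbf : (u == k) = false := beq_eq_false_iff_ne.mpr (Ne.symm he)
      simp only [List.lookup, hbf] at h
      exact List.mem_cons_of_mem _ (ih h)

-- membership of (u, v) in a_log's pair set ⇔ a_log[u]'s field value is v (given nodup keys and u present)
lemma mem_fcpPairs (a_log : List (String × List (String × String))) (field : String)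
    (ha : (a_log.map (·.1)).Nodup) (u : String) (ad : List (String × String))
    (hu : List.lookup u a_log = some ad) (v : Option String) :
    PySem.Set.contains (fcpPairs a_log field) (u, v) = true ↔ List.lookup field ad = v := by
  rw [fcpPairs, PySem.Set.contains_iff, PySem.Set.mem_ofList, List.mem_map]
  constructor
  · rintro ⟨q, hq, he⟩
    have h1 : q.1 = u := congrArg Prod.fst he
    have h2 : List.lookup field q.2 = v := congrArg Prod.snd he
    have := lookup_of_mem_nodup a_log ha q hq
    rw [h1, hu] at this
    cases this
    exact h2
  · intro hv
    exact ⟨(u, ad), mem_of_lookup_eq_some a_log u ad hu, by simp [hv]⟩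

-- per field, A's filter over b_log equals B's anti-join filter over the shared uids
lemma field_list_eq (a_log b_log : List (String × List (String × String)))
    (ha : (a_log.map (·.1)).Nodup) (hb : (b_log.map (·.1)).Nodup) (field : String) :
    (b_log.filter (fcpChanged a_log field)).map (·.1) =
    (((b_log.filter (fun p => (List.lookup p.1 a_log).isSome)).map (·.1)).filter
      (fun uid => ¬ (PySem.Set.contains (fcpPairs a_log field)
        (uid, (List.lookup uid b_log).bind (List.lookup field)) = true))) := by
  rw [List.filter_map, List.filter_filter]
  congr 1
  apply List.filter_congr
  intro p hp
  have hlp : List.lookup p.1 b_log = some p.2 := lookup_of_mem_nodup b_log hb p hp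
  cases h : List.lookup p.1 a_log with
  | none => simp [fcpChanged, h]
  | some ad =>
    have hbv : (List.lookup p.1 b_log).bind (List.lookup field) = List.lookup field p.2 := by
      rw [hlp]; rfl
    simp only [fcpChanged, h]
    by_cases hv : List.lookup field ad = List.lookup field p.2
    · have hc : (p.1, List.lookup field p.2) ∈ fcpPairs a_log field := by
        rw [← PySem.Set.contains_iff]
        exact (mem_fcpPairs a_log field ha p.1 ad h _).mpr hv
      simp [hv]
      rw [hbv]
      exact hc
    · have hc : (p.1, List.lookup field p.2) ∉ fcpPairs a_log field := by
        intro hmem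
        exact hv ((mem_fcpPairs a_log field ha p.1 ad h _).mp
          (by rw [PySem.Set.contains_iff]; exact hmem))
      simp [hv]
      rw [hbv]
      exact hc

-- ===== VERDICT (by name: the statement is the Claim_ definition above) =====
theorem find_changed_players_spec : Claim_equal_find_changed_players := by
  intro a_log b_log _ hpre
  obtain ⟨ha, hb, _⟩ := hpre
  unfold Spec_find_changed_players find_changed_players find_changed_players_alt
  rw [foldl_fcpStepA]
  simp only [List.nil_append, List.map_cons, List.map_nil]
  rw [field_list_eq a_log b_log ha hb "Name",
      field_list_eq a_log b_log ha hb "Level",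
      field_list_eq a_log b_log ha hb "BR_rank"]
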